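-- pv_equiv track=rewrite | github.com/LiYu0524/Domain-RAG | outpainting_updown_sampling_redux.py | split_samples_for_gpus
-- ===== SOURCE A (Python) =====
-- def split_samples_for_gpus(sample_list, num_gpus):
--     """将样本列表分配给多个GPU，支持不均匀分配"""
--     if num_gpus <= 1:
--         return [sample_list]
--
--     total_samples = len(sample_list)
--     samples_per_gpu = total_samples // num_gpus
--     remainder = total_samples % num_gpus
--
--     gpu_samples = []
--     start_idx = 0
--
--     for gpu_id in range(num_gpus):
--         # 前remainder个GPU多分配一个样本
--         current_batch_size = samples_per_gpu + (1 if gpu_id < remainder else 0)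
--         end_idx = start_idx + current_batch_size
--
--         gpu_samples.append(sample_list[start_idx:end_idx])
--         start_idx = end_idx
--
--     return gpu_samples
-- ===== SOURCE B (Python) =====
-- def split_samples_for_gpus(sample_list, num_gpus):
--     """将样本列表分配给多个GPU，支持不均匀分配"""
--     if num_gpus <= 1:
--         return [sample_list]
--     q, r = divmod(len(sample_list), num_gpus)
--     chunks = [[] for _ in range(num_gpus)]
--     # element-driven: classify each element's index to its gpu directly
--     for j, x in enumerate(sample_list):
--         if j < r * (q + 1):
--             g = j // (q + 1)
--         else:
--             g = r + (j - r * (q + 1)) // q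
--         chunks[g].append(x)
--     return chunks
-- ===== Notes on version B (the rewrite author's own statement) =====
-- stated objective: alternative
-- what changed: A slices the list chunk-by-chunk with a running start index; B makes one element-driven pass, computing each element's gpu directly from its index (j // (q+1) in the heavy prefix, else r + (j - r*(q+1)) // q) and appending it to that gpu's bucket.
import Mathlib
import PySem

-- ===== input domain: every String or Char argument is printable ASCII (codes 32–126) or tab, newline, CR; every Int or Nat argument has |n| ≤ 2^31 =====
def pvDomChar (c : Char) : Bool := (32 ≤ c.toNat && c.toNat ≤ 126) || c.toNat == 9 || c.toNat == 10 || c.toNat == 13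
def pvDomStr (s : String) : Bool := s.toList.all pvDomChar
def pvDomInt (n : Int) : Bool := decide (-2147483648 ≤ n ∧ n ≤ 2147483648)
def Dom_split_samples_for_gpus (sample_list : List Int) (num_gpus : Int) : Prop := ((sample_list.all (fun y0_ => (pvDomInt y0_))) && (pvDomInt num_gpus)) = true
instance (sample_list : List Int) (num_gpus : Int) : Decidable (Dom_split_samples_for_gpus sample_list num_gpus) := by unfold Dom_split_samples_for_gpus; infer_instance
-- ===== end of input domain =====

-- B replaces A's sequential slicing loop (running start index, one slice per gpu) by an element-driven
-- single pass: each element's gpu is computed directly from its index and the element is appended to that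
-- bucket; alternative decomposition, same cost.


-- ===== PORT A =====
def split_samples_for_gpus (sample_list : List Int) (num_gpus : Int) : List (List Int) :=
  if num_gpus ≤ 1 then [sample_list]
  else
    let total_samples : Int := sample_list.length
    let samples_per_gpu := PySem.Int.floordiv total_samples num_gpus
    let remainder := PySem.Int.mod total_samples num_gpus
    ((PySem.List.pyRange 0 num_gpus 1).foldl
      (fun (st : List (List Int) × Int) gpu_id =>
        let current_batch_size := samples_per_gpu + (if gpu_id < remainder then 1 else 0)
        let end_idx := st.2 + current_batch_size
        (st.1 ++ [PySem.List.slice sample_list (some st.2) (some end_idx)], end_idx))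
      ([], 0)).1

-- ===== PORT B =====
def split_samples_for_gpus_alt (sample_list : List Int) (num_gpus : Int) : List (List Int) :=
  if num_gpus ≤ 1 then [sample_list]
  else
    let q := PySem.Int.floordiv (sample_list.length : Int) num_gpus
    let r := PySem.Int.mod (sample_list.length : Int) num_gpus
    let chunks : List (List Int) := (PySem.List.pyRange 0 num_gpus 1).map (fun _ => [])
    -- chunks[g].append(x): g is provably in [0, num_gpus), so Nat indexing via .toNat is exact here
    (PySem.List.enumerate sample_list 0).foldl
      (fun chunks jx =>
        let g : Int := if jx.1 < r * (q + 1) then PySem.Int.floordiv jx.1 (q + 1)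
                       else r + PySem.Int.floordiv (jx.1 - r * (q + 1)) q
        chunks.modify g.toNat (fun c => c ++ [jx.2]))
      chunks

-- ===== PRECONDITION & SPEC =====
def Spec_split_samples_for_gpus (sample_list : List Int) (num_gpus : Int) (out : List (List Int)) : Prop := out = split_samples_for_gpus_alt sample_list num_gpus
instance (sample_list : List Int) (num_gpus : Int) (out : List (List Int)) : Decidable (Spec_split_samples_for_gpus sample_list num_gpus out) := by unfold Spec_split_samples_for_gpus; infer_instance

-- ===== CLAIM (what is proved, stated in full; the proofs are below) =====
def Claim_equal_split_samples_for_gpus : Prop := ∀ (sample_list : List Int) (num_gpus : Int), Dom_split_samples_for_gpus sample_list num_gpus → Spec_split_samples_for_gpus sample_list num_gpus (split_samples_for_gpus sample_list num_gpus)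

-- ===== LEMMAS AND PROOFS =====

-- chunk boundary: chunk i of the balanced split is sample_list[start q r i : start q r (i+1)]
def pvStart (q r i : Int) : Int := i * q + min i r

theorem pvStart_mono (q r : Int) (hq : 0 ≤ q) {i i' : Int} (h : i ≤ i') :
    pvStart q r i ≤ pvStart q r i' := by
  have h1 : i * q ≤ i' * q := mul_le_mul_of_nonneg_right h hq
  unfold pvStart; omega

-- A's accumulator loop, started at the closed-form boundary, produces the map of slices.
theorem pv_loop_eq (xs : List Int) (q r : Int) :
    ∀ (k : Nat) (a n : Int) (acc : List (List Int)), (n - a).toNat = k →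
    ((PySem.List.pyRange a n 1).foldl
      (fun (st : List (List Int) × Int) gpu_id =>
        let size := q + (if gpu_id < r then 1 else 0)
        let end_idx := st.2 + size
        (st.1 ++ [PySem.List.slice xs (some st.2) (some end_idx)], end_idx))
      (acc, pvStart q r a)).1
    = acc ++ (PySem.List.pyRange a n 1).map
        (fun i => PySem.List.slice xs (some (pvStart q r i)) (some (pvStart q r (i + 1)))) := by
  intro k
  induction k with
  | zero =>
    intro a n acc hk
    rw [PySem.List.pyRange_one_eq_nil (by omega)]
    simp
  | succ k ih =>
    intro a n acc hk
    rw [PySem.List.pyRange_one_cons (by omega)]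
    simp only [List.foldl_cons, List.map_cons]
    have hend : pvStart q r a + (q + (if a < r then 1 else 0)) = pvStart q r (a + 1) := by
      unfold pvStart
      split_ifs with h
      · have h1 : min a r = a := by omega
        have h2 : min (a + 1) r = a + 1 := by omega
        rw [h1, h2]; ring
      · have h1 : min a r = r := by omega
        have h2 : min (a + 1) r = r := by omega
        rw [h1, h2]; ring
    rw [hend, ih (a + 1) n _ (by omega)]
    simp

-- the bucket fold: bucket i collects, in order, the second components of the pairs routed to i
theorem pv_bucket (f : Int × Int → Nat) :
    ∀ (pairs : List (Int × Int)) (init : List (List Int)) (i : Nat),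
    (pairs.foldl (fun cs jx => cs.modify (f jx) (fun c => c ++ [jx.2])) init)[i]? =
      (init[i]?).map (· ++ (pairs.filter (fun jx => f jx == i)).map (·.2)) := by
  intro pairs
  induction pairs with
  | nil => intro init i; cases h : init[i]? <;> simp [h]
  | cons jx pairs ih =>
    intro init i
    simp only [List.foldl_cons, List.filter_cons]
    rw [ih]
    by_cases h : f jx = i
    · simp only [h, beq_self_eq_true, if_pos]
      rw [List.getElem?_modify]
      cases h' : init[i]? <;> simp [h', h]
    · have hb : (f jx == i) = false := by simp [h]
      simp only [hb, Bool.false_eq_true, if_neg, not_false_iff]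
      rw [List.getElem?_modify]
      cases h' : init[i]? <;> simp [h', h]

-- keeping the enumerated pairs with index < b keeps exactly the first (b - s) pairs
theorem pv_filter_lt (b : Int) :
    ∀ (xs : List Int) (s : Int),
    (PySem.List.enumerate xs s).filter (fun jx => decide (jx.1 < b))
      = PySem.List.enumerate (xs.take (b - s).toNat) s := by
  intro xs
  induction xs with
  | nil => intro s; simp [PySem.List.enumerate_nil]
  | cons x xs ih =>
    intro s
    rw [PySem.List.enumerate_cons]
    by_cases h : s < b
    · have hk : (b - s).toNat = (b - (s + 1)).toNat + 1 := by omega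
      rw [hk, List.take_succ_cons, PySem.List.enumerate_cons]
      simp only [List.filter_cons, decide_eq_true_eq, if_pos h]
      rw [ih]
    · have hk : (b - s).toNat = 0 := by omega
      have hk' : (b - (s + 1)).toNat = 0 := by omega
      simp only [List.filter_cons, decide_eq_true_eq, if_neg h, hk, List.take_zero,
        PySem.List.enumerate_nil]
      rw [ih, hk', List.take_zero, PySem.List.enumerate_nil]

-- keeping the enumerated pairs with index ≥ a drops exactly the first (a - s) pairs
theorem pv_filter_ge (a : Int) :
    ∀ (xs : List Int) (s : Int),
    (PySem.List.enumerate xs s).filter (fun jx => decide (a ≤ jx.1))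
      = PySem.List.enumerate (xs.drop (a - s).toNat) (max a s) := by
  intro xs
  induction xs with
  | nil => intro s; simp [PySem.List.enumerate_nil]
  | cons x xs ih =>
    intro s
    rw [PySem.List.enumerate_cons]
    by_cases h : a ≤ s
    · have hk : (a - s).toNat = 0 := by omega
      have hk' : (a - (s + 1)).toNat = 0 := by omega
      have hm : max a s = s := by omega
      have hm' : max a (s + 1) = s + 1 := by omega
      simp only [List.filter_cons, decide_eq_true_eq, if_pos h, hk, List.drop_zero]
      rw [ih, hk', List.drop_zero, hm, hm', PySem.List.enumerate_cons]
    · have hk : (a - s).toNat = (a - (s + 1)).toNat + 1 := by omega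
      have hm : max a s = a := by omega
      have hm' : max a (s + 1) = a := by omega
      simp only [List.filter_cons, decide_eq_true_eq, if_neg h]
      rw [ih, hk, List.drop_succ_cons, hm, hm']

-- the pairs whose index lies in [a, b), projected to values, are the slice xs[a:b]
theorem pv_filter_interval (xs : List Int) (a b : Int) (ha : 0 ≤ a) :
    (((PySem.List.enumerate xs 0).filter
        (fun jx => decide (a ≤ jx.1) && decide (jx.1 < b))).map (·.2))
      = (xs.drop a.toNat).take (b.toNat - a.toNat) := by
  rw [← List.filter_filter, pv_filter_lt b xs 0, pv_filter_ge a, PySem.List.map_snd_enumerate]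
  have h0 : (b - 0).toNat = b.toNat := by omega
  have h1 : (a - 0).toNat = a.toNat := by omega
  rw [h0, h1, List.drop_take]

-- the element classifier lands in bucket i exactly when the index lies in [start i, start (i+1))
theorem pv_g_nonneg (q r j : Int) (hq : 0 ≤ q) (hr0 : 0 ≤ r) (hj0 : 0 ≤ j) :
    0 ≤ (if j < r * (q + 1) then PySem.Int.floordiv j (q + 1)
         else r + PySem.Int.floordiv (j - r * (q + 1)) q) := by
  split_ifs with h
  · exact (PySem.Int.le_floordiv_iff_mul_le (by omega)).mpr (by omega)
  · push_neg at h
    by_cases hq0 : q = 0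
    · subst hq0
      have hz : PySem.Int.floordiv (j - r * (0 + 1)) 0 = 0 := by simp [PySem.Int.floordiv]
      rw [hz]; omega
    · have := (PySem.Int.le_floordiv_iff_mul_le (a := j - r * (q + 1)) (q := 0)
        (show (0:Int) < q by omega)).mpr (by omega)
      omega

theorem pv_g_eq_iff (q r G j i : Int) (hq : 0 ≤ q) (hr0 : 0 ≤ r) (hrG : r < G)
    (hj0 : 0 ≤ j) (hjL : j < q * G + r) (hi : 0 ≤ i) :
    ((if j < r * (q + 1) then PySem.Int.floordiv j (q + 1)
      else r + PySem.Int.floordiv (j - r * (q + 1)) q) = i)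
    ↔ (pvStart q r i ≤ j ∧ j < pvStart q r (i + 1)) := by
  -- bracket of the classified value
  have hg : ∀ g, g = (if j < r * (q + 1) then PySem.Int.floordiv j (q + 1)
      else r + PySem.Int.floordiv (j - r * (q + 1)) q) →
      0 ≤ g ∧ pvStart q r g ≤ j ∧ j < pvStart q r (g + 1) := by
    intro g hgdef
    by_cases h : j < r * (q + 1)
    · rw [if_pos h] at hgdef
      have hpos : (0 : Int) < q + 1 := by omega
      have hbr := (PySem.Int.floordiv_eq_iff_of_pos hpos).mp hgdef.symm
      have hg0 : 0 ≤ g := by nlinarith [hbr.1, hbr.2]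
      have hglt : g < r := by nlinarith [hbr.1, hbr.2]
      have hmin1 : min g r = g := by omega
      have hmin2 : min (g + 1) r = g + 1 := by omega
      refine ⟨hg0, ?_, ?_⟩ <;> unfold pvStart
      · rw [hmin1]; nlinarith [hbr.1]
      · rw [hmin2]; nlinarith [hbr.2]
    · rw [if_neg h] at hgdef
      push_neg at h
      have hqpos : (0 : Int) < q := by nlinarith
      have hbr := (PySem.Int.floordiv_eq_iff_of_pos hqpos).mp
        (show PySem.Int.floordiv (j - r * (q + 1)) q = g - r by omega)
      have hg0 : r ≤ g := by nlinarith [hbr.1]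
      have hmin1 : min g r = r := by omega
      have hmin2 : min (g + 1) r = r := by omega
      refine ⟨by omega, ?_, ?_⟩ <;> unfold pvStart
      · rw [hmin1]; nlinarith [hbr.1]
      · rw [hmin2]; nlinarith [hbr.2]
  obtain ⟨hg0, hlo, hhi⟩ := hg _ rfl
  constructor
  · intro h; rw [← h]; exact ⟨hlo, hhi⟩
  · intro ⟨hlo', hhi'⟩
    set g := (if j < r * (q + 1) then PySem.Int.floordiv j (q + 1)
      else r + PySem.Int.floordiv (j - r * (q + 1)) q) with hgdef
    by_contra hne
    rcases lt_or_gt_of_ne hne with hlt | hgt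
    · have := pvStart_mono q r hq (show g + 1 ≤ i by omega); omega
    · have := pvStart_mono q r hq (show i + 1 ≤ g by omega); omega

theorem split_samples_for_gpus_eq (sample_list : List Int) (num_gpus : Int) :
    split_samples_for_gpus sample_list num_gpus = split_samples_for_gpus_alt sample_list num_gpus := by
  unfold split_samples_for_gpus split_samples_for_gpus_alt
  by_cases h : num_gpus ≤ 1
  · simp [h]
  · simp only [h, if_false]
    have hG : (1 : Int) < num_gpus := by omega
    have hGpos : (0 : Int) < num_gpus := by omega
    set L : Int := (sample_list.length : Int) with hLdef
    set q := PySem.Int.floordiv L num_gpus with hqdef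
    set r := PySem.Int.mod L num_gpus with hrdef
    have hL0 : 0 ≤ L := by positivity
    have hr0 : 0 ≤ r := PySem.Int.mod_nonneg L hGpos
    have hrG : r < num_gpus := PySem.Int.mod_lt L hGpos
    have hqr : q * num_gpus + r = L := PySem.Int.floordiv_mul_add_mod L num_gpus
    have hq0 : 0 ≤ q := by nlinarith
    -- A's side: the accumulator loop is the map of closed-form slices
    have hA := pv_loop_eq sample_list q r num_gpus.toNat 0 num_gpus []
      (by omega)
    have hstart0 : pvStart q r 0 = 0 := by unfold pvStart; omega
    rw [hstart0] at hA
    simp only [hA, List.nil_append]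
    -- B's side: pointwise over the buckets
    apply List.ext_getElem?
    intro i
    rw [pv_bucket (fun jx => (if jx.1 < r * (q + 1) then PySem.Int.floordiv jx.1 (q + 1)
        else r + PySem.Int.floordiv (jx.1 - r * (q + 1)) q).toNat)]
    by_cases hi : i < num_gpus.toNat
    · -- initial bucket i is []
      have hlen : ((PySem.List.pyRange 0 num_gpus 1).map
          (fun _ => ([] : List Int))).length = num_gpus.toNat := by
        rw [List.length_map, PySem.List.length_pyRange_one]; omega
      have hinit : ((PySem.List.pyRange 0 num_gpus 1).map
          (fun _ => ([] : List Int)))[i]? = some [] := by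
        rw [List.getElem?_eq_getElem (by omega)]
        simp
      rw [hinit]
      -- map side
      have hGnat : num_gpus = ((num_gpus.toNat : Nat) : Int) := by omega
      have hmap : ((PySem.List.pyRange 0 num_gpus 1).map
          (fun x => PySem.List.slice sample_list (some (pvStart q r x))
            (some (pvStart q r (x + 1)))))[i]? =
          some (PySem.List.slice sample_list (some (pvStart q r (i : Int)))
            (some (pvStart q r ((i : Int) + 1)))) := by
        rw [hGnat, PySem.List.getElem?_map_pyRange_zero _ _ _ hi]
      rw [hmap]
      -- rewrite the filter condition to an interval test on the index
      have hcong : ((PySem.List.enumerate sample_list 0).filter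
            (fun jx => (if jx.1 < r * (q + 1) then PySem.Int.floordiv jx.1 (q + 1)
              else r + PySem.Int.floordiv (jx.1 - r * (q + 1)) q).toNat == i))
          = (PySem.List.enumerate sample_list 0).filter
            (fun jx => decide (pvStart q r (i : Int) ≤ jx.1) &&
              decide (jx.1 < pvStart q r ((i : Int) + 1))) := by
        apply List.filter_congr
        intro jx hjx
        have hj : 0 ≤ jx.1 ∧ jx.1 < L := by
          have : jx.1 ∈ (PySem.List.enumerate sample_list 0).map (fun x => x.1) :=
            List.mem_map_of_mem hjx
          rw [PySem.List.map_fst_enumerate] at this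
          have := PySem.List.mem_pyRange_one.mp this
          omega
        have hiff := pv_g_eq_iff q r num_gpus jx.1 (i : Int) hq0 hr0 hrG hj.1
          (by omega) (by positivity)
        have hg0 : 0 ≤ (if jx.1 < r * (q + 1) then PySem.Int.floordiv jx.1 (q + 1)
            else r + PySem.Int.floordiv (jx.1 - r * (q + 1)) q) :=
          pv_g_nonneg q r jx.1 hq0 hr0 hj.1
        rw [Bool.eq_iff_iff]
        simp only [beq_iff_eq, Bool.and_eq_true, decide_eq_true_eq]
        constructor
        · intro hEq
          have : (if jx.1 < r * (q + 1) then PySem.Int.floordiv jx.1 (q + 1)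
              else r + PySem.Int.floordiv (jx.1 - r * (q + 1)) q) = (i : Int) := by omega
          exact hiff.mp this
        · intro hIv
          have := hiff.mpr ⟨hIv.1, hIv.2⟩
          omega
      rw [hcong, pv_filter_interval _ _ _ ?hnn]
      case hnn => unfold pvStart; positivity
      -- slice = drop/take
      have hs0 : 0 ≤ pvStart q r (i : Int) := by unfold pvStart; positivity
      have hs1 : 0 ≤ pvStart q r ((i : Int) + 1) := by unfold pvStart; positivity
      rw [PySem.List.slice_toNat sample_list hs0 hs1]
      simp
    · -- out of range: both none
      have h1 : ((PySem.List.pyRange 0 num_gpus 1).map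
          (fun x => PySem.List.slice sample_list (some (pvStart q r x))
            (some (pvStart q r (x + 1))))).length = num_gpus.toNat := by
        rw [List.length_map, PySem.List.length_pyRange_one]; omega
      have h2 : ((PySem.List.pyRange 0 num_gpus 1).map
          (fun _ => ([] : List Int))).length = num_gpus.toNat := by
        rw [List.length_map, PySem.List.length_pyRange_one]; omega
      rw [List.getElem?_eq_none (by omega), List.getElem?_eq_none (by omega)]
      rfl

-- ===== VERDICT (by name: the statement is the Claim_ definition above) =====
theorem split_samples_for_gpus_spec : Claim_equal_split_samples_for_gpus := by
  intro sample_list num_gpus _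
  exact split_samples_for_gpus_eq sample_list num_gpus
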